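-- pv_equiv track=rewrite | github.com/Tbduc/April2022 | tic_tac_toe.py | create_new_board
-- ===== SOURCE A (Python) =====
-- def create_new_board(board, move, current_player, coordinates):
--     for row in range(len(coordinates)):
--         for index in range(len(board)):
--             if current_player == "X":
--                 if move == coordinates[row][index]:
--                     board[row][index] = "X"
--             else:
--                 if move == coordinates[row][index]:
--                     board[row][index] = "O"
--     return board
-- ===== SOURCE B (Python) =====
-- def create_new_board(board, move, current_player, coordinates):
--     positions = {}
--     for r in range(len(coordinates)):
--         for i in range(len(board)):
--             positions.setdefault(coordinates[r][i], []).append((r, i))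
--     mark = "X" if current_player == "X" else "O"
--     for (r, i) in positions.get(move, []):
--         board[r][i] = mark
--     return board
-- ===== Notes on version B (the rewrite author's own statement) =====
-- stated objective: alternative
-- what changed: Instead of testing and writing each cell inside the nested scan, B builds a value-to-positions index (dict of lists) in the same row-major read order, then looks up the move once and batch-assigns the mark to the recorded positions.
import Mathlib
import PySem

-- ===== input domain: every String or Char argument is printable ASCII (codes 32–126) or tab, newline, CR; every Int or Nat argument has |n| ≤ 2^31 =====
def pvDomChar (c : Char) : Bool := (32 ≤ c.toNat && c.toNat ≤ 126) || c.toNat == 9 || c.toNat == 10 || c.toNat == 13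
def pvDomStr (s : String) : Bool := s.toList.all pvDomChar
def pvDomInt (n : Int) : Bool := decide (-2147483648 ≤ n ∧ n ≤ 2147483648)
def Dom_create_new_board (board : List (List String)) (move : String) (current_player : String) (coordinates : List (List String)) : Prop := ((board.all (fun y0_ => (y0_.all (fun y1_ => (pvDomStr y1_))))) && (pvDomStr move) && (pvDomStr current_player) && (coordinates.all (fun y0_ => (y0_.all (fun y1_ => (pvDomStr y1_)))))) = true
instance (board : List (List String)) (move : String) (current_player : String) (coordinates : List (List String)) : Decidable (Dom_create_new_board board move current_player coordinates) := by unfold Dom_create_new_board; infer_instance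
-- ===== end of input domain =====

-- B replaces the per-cell test-and-write scan by a value→positions index built in the same
-- row-major order plus one lookup and batch assignment (alternative decomposition, same cost).
-- Note: the Python versions mutate `board` in place; the equivalence proved here is about the
-- return value (both mutate identically anyway).


-- ===== PORT A =====
-- coordinates[r][i] ; the `none` (IndexError) case is excluded by Pre_, the "" default is never read there
def pvGet2 (xs : List (List String)) (r i : Int) : String :=
  ((PySem.List.pyGet? xs r).bind (fun row => PySem.List.pyGet? row i)).getD ""

-- board[r][i] = v ; r comes from range(...) so r ≥ 0 and .toNat is exact; the out-of-range
-- cases (Python IndexError) are excluded by Pre_ and leave the board unchanged here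
def pvSet2 (b : List (List String)) (r i : Int) (v : String) : List (List String) :=
  match PySem.List.pyGet? b r with
  | none => b
  | some row => b.set r.toNat (PySem.List.pySetD row i v)

def create_new_board (board : List (List String)) (move : String) (current_player : String) (coordinates : List (List String)) : List (List String) :=
  (PySem.List.pyRange 0 (coordinates.length : Int) 1).foldl
    (fun b row =>
      (PySem.List.pyRange 0 (b.length : Int) 1).foldl
        (fun b2 index =>
          if current_player == "X" then
            (if move == pvGet2 coordinates row index then pvSet2 b2 row index "X" else b2)
          else
            (if move == pvGet2 coordinates row index then pvSet2 b2 row index "O" else b2))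
        b)
    board

-- ===== PORT B =====
def create_new_board_alt (board : List (List String)) (move : String) (current_player : String) (coordinates : List (List String)) : List (List String) :=
  let positions : PySem.Dict String (List (Int × Int)) :=
    (PySem.List.pyRange 0 (coordinates.length : Int) 1).foldl
      (fun d r =>
        (PySem.List.pyRange 0 (board.length : Int) 1).foldl
          (fun d2 i => d2.modify (pvGet2 coordinates r i) [] (fun l => l ++ [(r, i)]))
          d)
      PySem.Dict.empty
  let mark := if current_player == "X" then "X" else "O"
  (positions.getD move []).foldl (fun b p => pvSet2 b p.1 p.2 mark) board

-- ===== PRECONDITION & SPEC =====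
-- Pre_ excludes exactly the inputs where Python A raises IndexError: a coordinates row shorter
-- than len(board) (read error), or a matching coordinate whose cell lies outside board (write error).
def Pre_create_new_board (board : List (List String)) (move : String) (current_player : String) (coordinates : List (List String)) : Prop :=
  (∀ r ∈ List.range coordinates.length, board.length ≤ (coordinates.getD r []).length) ∧
  (∀ r ∈ List.range coordinates.length, ∀ i ∈ List.range board.length,
      (coordinates.getD r []).getD i "" = move →
      r < board.length ∧ i < (board.getD r []).length)
instance (board : List (List String)) (move : String) (current_player : String) (coordinates : List (List String)) : Decidable (Pre_create_new_board board move current_player coordinates) := by unfold Pre_create_new_board; infer_instance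

def pvWitness_create_new_board : List (List String) × String × String × List (List String) :=
  ([["-", "-"], ["-", "-"]], "a1", "X", [["a1", "a2"], ["b1", "b2"]])

def Spec_create_new_board (board : List (List String)) (move : String) (current_player : String) (coordinates : List (List String)) (out : List (List String)) : Prop := out = create_new_board_alt board move current_player coordinates
instance (board : List (List String)) (move : String) (current_player : String) (coordinates : List (List String)) (out : List (List String)) : Decidable (Spec_create_new_board board move current_player coordinates out) := by unfold Spec_create_new_board; infer_instance

-- ===== CLAIM (what is proved, stated in full; the proofs are below) =====
def Claim_equal_create_new_board : Prop := ∀ (board : List (List String)) (move : String) (current_player : String) (coordinates : List (List String)), Dom_create_new_board board move current_player coordinates → Pre_create_new_board board move current_player coordinates → Spec_create_new_board board move current_player coordinates (create_new_board board move current_player coordinates)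

-- ===== LEMMAS AND PROOFS =====

-- positions in row r (in index order) whose coordinate equals move
def pvRowM (coordinates : List (List String)) (move : String) (n : Nat) (r : Int) : List (Int × Int) :=
  ((PySem.List.pyRange 0 (n : Int) 1).filter (fun i => move == pvGet2 coordinates r i)).map (fun i => (r, i))

theorem pvSet2_length (b : List (List String)) (r i : Int) (v : String) :
    (pvSet2 b r i v).length = b.length := by
  unfold pvSet2; split <;> simp

theorem pv_foldl_if_filter {α β : Type} (P : α → Bool) (g : β → α → β) :
    ∀ (xs : List α) (b : β),
      xs.foldl (fun b i => if P i then g b i else b) b = (xs.filter P).foldl g b := by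
  intro xs
  induction xs with
  | nil => intro b; rfl
  | cons x xs ih =>
    intro b
    by_cases h : P x = true <;> simp [h, ih]

theorem pv_innerA (coordinates : List (List String)) (move mark : String) (r : Int) (n : Nat) :
    ∀ (b : List (List String)),
      (PySem.List.pyRange 0 (n : Int) 1).foldl
        (fun b2 i => if move == pvGet2 coordinates r i then pvSet2 b2 r i mark else b2) b
      = (pvRowM coordinates move n r).foldl (fun b p => pvSet2 b p.1 p.2 mark) b := by
  intro b
  rw [pv_foldl_if_filter]
  unfold pvRowM
  rw [List.foldl_map]

theorem pv_innerA_length (coordinates : List (List String)) (move mark : String) (r : Int) (n : Nat)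
    (b : List (List String)) :
    ((PySem.List.pyRange 0 (n : Int) 1).foldl
        (fun b2 i => if move == pvGet2 coordinates r i then pvSet2 b2 r i mark else b2) b).length
      = b.length := by
  rw [pv_innerA]
  generalize pvRowM coordinates move n r = ps
  induction ps generalizing b with
  | nil => rfl
  | cons p ps ih => simp [List.foldl_cons, ih, pvSet2_length]

theorem pv_outerA (coordinates : List (List String)) (move mark : String) (N : Nat) :
    ∀ (rs : List Int) (b : List (List String)), b.length = N →
      rs.foldl
        (fun b r =>
          (PySem.List.pyRange 0 (b.length : Int) 1).foldl
            (fun b2 i => if move == pvGet2 coordinates r i then pvSet2 b2 r i mark else b2) b)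
        b
      = (rs.flatMap (pvRowM coordinates move N)).foldl (fun b p => pvSet2 b p.1 p.2 mark) b := by
  intro rs
  induction rs with
  | nil => intro b hb; rfl
  | cons r rs ih =>
    intro b hb
    rw [List.foldl_cons, List.flatMap_cons, List.foldl_append]
    rw [hb]
    rw [ih _ (by rw [pv_innerA_length, hb])]
    rw [pv_innerA]

theorem pv_innerB (coordinates : List (List String)) (move : String) (r : Int) :
    ∀ (xs : List Int) (d : PySem.Dict String (List (Int × Int))),
      ((xs.foldl (fun d2 i => d2.modify (pvGet2 coordinates r i) [] (fun l => l ++ [(r, i)])) d).getD move [])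
      = d.getD move [] ++ ((xs.filter (fun i => move == pvGet2 coordinates r i)).map (fun i => (r, i))) := by
  intro xs
  induction xs with
  | nil => intro d; simp
  | cons x xs ih =>
    intro d
    rw [List.foldl_cons, ih]
    by_cases h : move = pvGet2 coordinates r x
    · simp [h]
    · simp [PySem.Dict.getD_modify, h]

theorem pv_outerB (coordinates : List (List String)) (move : String) (N : Nat) :
    ∀ (rs : List Int) (d : PySem.Dict String (List (Int × Int))),
      ((rs.foldl
          (fun d r =>
            (PySem.List.pyRange 0 (N : Int) 1).foldl
              (fun d2 i => d2.modify (pvGet2 coordinates r i) [] (fun l => l ++ [(r, i)])) d)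
          d).getD move [])
      = d.getD move [] ++ rs.flatMap (pvRowM coordinates move N) := by
  intro rs
  induction rs with
  | nil => intro d; simp
  | cons r rs ih =>
    intro d
    rw [List.foldl_cons, ih, List.flatMap_cons, pv_innerB]
    unfold pvRowM
    rw [List.append_assoc]

-- ===== VERDICT (by name: the statement is the Claim_ definition above) =====
theorem create_new_board_spec : Claim_equal_create_new_board := by
  intro board move current_player coordinates _hdom _hpre
  unfold Spec_create_new_board create_new_board create_new_board_alt
  dsimp only
  rw [pv_outerB coordinates move board.length _ PySem.Dict.empty]
  simp only [PySem.Dict.getD_empty, List.nil_append]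
  by_cases hcp : current_player == "X"
  · simp only [hcp, if_true]
    exact pv_outerA coordinates move "X" board.length _ board rfl
  · simp only [hcp, if_false, Bool.false_eq_true]
    exact pv_outerA coordinates move "O" board.length _ board rfl
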